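-- pv_equiv track=rewrite | github.com/L2dulgi/SIL-C | remoteEnv/kitchen/verify_dataset_alignment.py | episode_segments
-- ===== SOURCE A (Python) =====
-- from typing import Iterable, List, Sequence, Tuple
--
-- def episode_segments(terminals: Sequence[bool]) -> List[Tuple[int, int]]:
--     """Return inclusive-exclusive index pairs for each episode."""
--     segments: List[Tuple[int, int]] = []
--     start = 0
--     for idx, flag in enumerate(terminals):
--         if flag:
--             segments.append((start, idx + 1))
--             start = idx + 1
--     if start < len(terminals):
--         segments.append((start, len(terminals)))
--     return segments
-- ===== SOURCE B (Python) =====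
-- def episode_segments(terminals):
--     """Return inclusive-exclusive index pairs for each episode."""
--     n = len(terminals)
--     bounds = [0] + [i + 1 for i, f in enumerate(terminals) if f]
--     if n and not terminals[-1]:
--         bounds.append(n)
--     return list(zip(bounds, bounds[1:]))
-- ===== Notes on version B (the rewrite author's own statement) =====
-- stated objective: alternative
-- what changed: B builds the complete boundary list (0, each cut i+1, and the final length for a trailing unterminated episode) and forms segments as zip(bounds, bounds[1:]), replacing A's stateful sweep that carries a running start and appends segments inside the loop.
import Mathlib
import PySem

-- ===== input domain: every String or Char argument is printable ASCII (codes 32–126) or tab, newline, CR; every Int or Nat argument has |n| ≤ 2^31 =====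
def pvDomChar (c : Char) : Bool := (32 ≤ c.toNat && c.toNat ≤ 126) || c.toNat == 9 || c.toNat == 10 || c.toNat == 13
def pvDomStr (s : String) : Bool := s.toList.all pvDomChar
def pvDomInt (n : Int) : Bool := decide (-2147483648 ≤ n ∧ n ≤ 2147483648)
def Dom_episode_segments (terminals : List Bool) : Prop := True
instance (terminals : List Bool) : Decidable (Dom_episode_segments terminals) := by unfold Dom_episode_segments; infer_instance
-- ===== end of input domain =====

-- B replaces A's stateful sweep by a boundary-list construction: bounds = 0 :: cuts (:: n for a
-- trailing unterminated episode), segments = zip(bounds, bounds[1:]) (alternative decomposition, same cost).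


-- ===== PORT A =====
-- single sweep: accumulator (segments, start), appending on each terminal flag
def episode_segments (terminals : List Bool) : List (Int × Int) :=
  let st := (PySem.List.enumerate terminals).foldl
    (fun (acc : List (Int × Int) × Int) (p : Int × Bool) =>
      if p.2 then (acc.1 ++ [(acc.2, p.1 + 1)], p.1 + 1) else acc)
    ([], 0)
  if st.2 < (terminals.length : Int) then st.1 ++ [(st.2, (terminals.length : Int))] else st.1

-- ===== PORT B =====
-- the comprehension [i + 1 for i, f in enumerate(terminals) if f]
def pvCuts (ts : List Bool) : List Int :=
  (PySem.List.enumerate ts).filterMap (fun (p : Int × Bool) => if p.2 then some (p.1 + 1) else none)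

-- B: build the full boundary list, then pair it with its own tail (zip(bounds, bounds[1:]))
-- 'n and not terminals[-1]' is exactly 'terminals.getLast? = some false'
def episode_segments_alt (terminals : List Bool) : List (Int × Int) :=
  let n : Int := terminals.length
  let bounds :=
    if terminals.getLast? = some false then (0 :: pvCuts terminals) ++ [n]
    else 0 :: pvCuts terminals
  bounds.zip bounds.tail

-- ===== PRECONDITION & SPEC =====
def Spec_episode_segments (terminals : List Bool) (out : List (Int × Int)) : Prop := out = episode_segments_alt terminals
instance (terminals : List Bool) (out : List (Int × Int)) : Decidable (Spec_episode_segments terminals out) := by unfold Spec_episode_segments; infer_instance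

-- ===== CLAIM (what is proved, stated in full; the proofs are below) =====
def Claim_equal_episode_segments : Prop := ∀ (terminals : List Bool), Dom_episode_segments terminals → Spec_episode_segments terminals (episode_segments terminals)

-- ===== LEMMAS AND PROOFS =====

-- a nonempty list's getLastD ignores the default
theorem getLastD_irrel (l : List Int) (a b c : Int) :
    (a :: l).getLast?.getD b = (a :: l).getLast?.getD c := by
  cases h : (a :: l).getLast? with
  | none => simp [List.getLast?_eq_none_iff] at h
  | some v => simp

-- A's conditional fold over enumerate is a fold over the cut list
theorem foldl_if_eq_foldl_cuts (l : List (Int × Bool)) (acc : List (Int × Int) × Int) :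
    l.foldl (fun (acc : List (Int × Int) × Int) (p : Int × Bool) =>
        if p.2 then (acc.1 ++ [(acc.2, p.1 + 1)], p.1 + 1) else acc) acc
      = (l.filterMap (fun (p : Int × Bool) => if p.2 then some (p.1 + 1) else none)).foldl
          (fun (acc : List (Int × Int) × Int) (b : Int) => (acc.1 ++ [(acc.2, b)], b)) acc := by
  induction l generalizing acc with
  | nil => rfl
  | cons p t ih => cases p with | mk i f => cases f <;> simp [ih]

-- the pairing fold, in closed form: zip with the shifted list, last boundary as state
theorem foldl_pair (cs : List Int) (s : Int) (segs : List (Int × Int)) :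
    cs.foldl (fun (acc : List (Int × Int) × Int) (b : Int) => (acc.1 ++ [(acc.2, b)], b)) (segs, s)
      = (segs ++ (s :: cs).zip cs, cs.getLastD s) := by
  induction cs generalizing s segs with
  | nil => simp
  | cons c cs ih =>
    simp [ih]
    cases cs with
    | nil => simp
    | cons h t => exact getLastD_irrel _ _ _ _

-- zipping a ++[y]-extended list with its tail adds one final pair
theorem zip_shift_append (x : Int) (xs : List Int) (y : Int) :
    ((x :: xs) ++ [y]).zip (xs ++ [y]) = (x :: xs).zip xs ++ [(xs.getLastD x, y)] := by
  induction xs generalizing x with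
  | nil => simp
  | cons a xs ih =>
    simp only [List.cons_append, List.zip_cons_cons] at *
    rw [ih a]
    cases xs with
    | nil => simp
    | cons h t =>
      simp
      exact getLastD_irrel _ _ _ _

theorem cuts_append (ts : List Bool) (b : Bool) :
    pvCuts (ts ++ [b]) = pvCuts ts ++ (if b then [((ts.length : Int) + 1)] else []) := by
  unfold pvCuts
  rw [PySem.List.enumerate_append]
  cases b <;> simp [PySem.List.enumerate_cons, PySem.List.enumerate_nil]

theorem mem_cuts_le (ts : List Bool) (c : Int) (h : c ∈ pvCuts ts) : c ≤ (ts.length : Int) := by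
  induction ts using List.reverseRecOn with
  | nil => simp [pvCuts, PySem.List.enumerate_nil] at h
  | append_singleton ts b ih =>
    rw [cuts_append] at h
    rcases List.mem_append.1 h with h' | h'
    · have := ih h'; simp; omega
    · cases b <;> simp at h'
      simp [h']

theorem mem_cuts_lt (ts : List Bool) (c : Int) (hl : ts.getLast? = some false)
    (h : c ∈ pvCuts ts) : c < (ts.length : Int) := by
  induction ts using List.reverseRecOn with
  | nil => simp at hl
  | append_singleton ts b ih =>
    rw [List.getLast?_concat] at hl
    have hb : b = false := by simpa using hl.symm
    subst hb
    rw [cuts_append] at h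
    simp at h
    have := mem_cuts_le ts c h
    simp; omega

theorem last_cut (ts : List Bool) (hl : ts.getLast? = some true) :
    (pvCuts ts).getLastD 0 = (ts.length : Int) := by
  induction ts using List.reverseRecOn with
  | nil => simp at hl
  | append_singleton ts b ih =>
    rw [List.getLast?_concat] at hl
    have hb : b = true := by simpa using hl.symm
    subst hb
    rw [cuts_append]
    simp

-- ===== VERDICT (by name: the statement is the Claim_ definition above) =====
theorem episode_segments_spec : Claim_equal_episode_segments := by
  intro terminals _
  unfold Spec_episode_segments
  simp only [episode_segments, episode_segments_alt]
  rw [foldl_if_eq_foldl_cuts]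
  rw [show ((PySem.List.enumerate terminals).filterMap fun (p : Int × Bool) => if p.2 then some (p.1 + 1) else none) = pvCuts terminals from rfl]
  rw [foldl_pair]
  simp only [List.nil_append]
  rcases hl : terminals.getLast? with _ | b
  · -- empty list
    have : terminals = [] := List.getLast?_eq_none_iff.1 hl
    subst this
    simp [pvCuts, PySem.List.enumerate_nil]
  · cases b with
    | true =>
      rw [last_cut terminals hl]
      simp
    | false =>
      have hne : terminals ≠ [] := by intro h; subst h; simp at hl
      have hn : 1 ≤ (terminals.length : Int) := by
        have := List.length_pos_iff.2 hne; omega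
      have hcond : (pvCuts terminals).getLastD 0 < (terminals.length : Int) := by
        cases hc : pvCuts terminals with
        | nil => simpa [hc] using hn
        | cons a l =>
          have hmem0 : (a :: l).getLastD 0 ∈ a :: l := by
            rw [List.getLastD_cons]
            exact List.getLastD_mem_cons
          have hmem : (a :: l).getLastD 0 ∈ pvCuts terminals := by rw [hc]; exact hmem0
          exact mem_cuts_lt terminals _ hl hmem
      rw [if_pos hcond]
      show (0 :: pvCuts terminals).zip (pvCuts terminals) ++ [((pvCuts terminals).getLastD 0, (terminals.length : Int))]
          = ((0 :: pvCuts terminals) ++ [(terminals.length : Int)]).zip (pvCuts terminals ++ [(terminals.length : Int)])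
      rw [zip_shift_append]
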